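-- pv_equiv track=rewrite | github.com/Ronaldo-OlSi/Calculadora-de-Matrizes | operacoes.py | inverter
-- ===== SOURCE A (Python) =====
-- def inverter(MA):
--     for i in range(0, 50):
--         x = len(MA)  # numero de linhas
--         y = len(MA[0])  # numero de colunas
--         MB = []
--
--     # cria matriz de tamanha igual
--
--     for i in range(0, len(MA)):
--         linha = []
--         for j in range(0, len(MA[0])):
--             linha.append(j + i)
--         MB.append(linha)
--
--     for i in range(0, 50):
--         MC = []
--     # cria matriz invertendo o numero de linhs ecolunas
--     for i in range(0, len(MA[0])):
--         linha = []
--         for j in range(0, len(MA)):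
--             linha.append(MA[j][i])
--         MC.append(linha)
--     for i in range(0, len(MC)):
--     # inverte a matriz
--      MD = []
--     for i in range(0, len(MA[0])):
--         linha = []
--         for j in range(0, len(MA)):
--             linha.append(MA[len(MA) - 1 - j][len(MA[0]) - 1 - i])
--         MD.append(linha)
--
--     return MD
-- ===== SOURCE B (Python) =====
-- def inverter(MA):
--     y = len(MA[0])
--     temp = [list(reversed(row[:y])) for row in reversed(MA)]
--     return [list(col) for col in zip(*temp)]
-- ===== Notes on version B (the rewrite author's own statement) =====
-- stated objective: simpler
-- what changed: Replaces A's dead warm-up loops and fused reversed-index double loop by two plain passes: a list-comprehension 180-degree rotation (reverse rows and each row) followed by a zip(*...) transpose.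
import Mathlib
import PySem

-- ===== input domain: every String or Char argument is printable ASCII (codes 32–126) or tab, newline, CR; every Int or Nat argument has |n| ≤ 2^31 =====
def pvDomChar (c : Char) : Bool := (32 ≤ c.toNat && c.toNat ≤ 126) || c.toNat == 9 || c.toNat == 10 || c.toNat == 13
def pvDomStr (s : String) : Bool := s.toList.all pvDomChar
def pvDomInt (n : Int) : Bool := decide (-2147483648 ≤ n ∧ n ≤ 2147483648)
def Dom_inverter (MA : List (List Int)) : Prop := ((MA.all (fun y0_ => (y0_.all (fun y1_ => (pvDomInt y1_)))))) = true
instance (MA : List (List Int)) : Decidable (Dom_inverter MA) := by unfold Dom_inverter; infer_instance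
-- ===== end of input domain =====

-- B rotates the matrix 180° and transposes it in two comprehension passes instead of A's
-- fused reversed-index double loop; same values, objective: simpler.

-- ===== PORT A =====
-- the first Python loops run 50 / len-many times re-binding the same values; their final state is kept here as lets
def inverter (MA : List (List Int)) : List (List Int) :=
  let x := MA.length
  let y := (MA.headD []).length
  let _MB := (List.range x).map (fun i => (List.range y).map (fun j => ((j : Int) + (i : Int))))
  let _MC := (List.range y).map (fun i => (List.range x).map (fun j => (MA.getD j []).getD i 0))
  let MD := (List.range y).map (fun i =>
    (List.range x).map (fun j => (MA.getD (x - 1 - j) []).getD (y - 1 - i) 0))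
  MD

-- ===== PORT B =====
-- zip(*rows): take heads while no row is exhausted (Python's zip stops at the shortest row)
def pyZipStar (rows : List (List Int)) : List (List Int) :=
  if h : rows.isEmpty ∨ rows.any List.isEmpty then []
  else (rows.map (fun r => r.headD 0)) :: pyZipStar (rows.map List.tail)
termination_by (rows.headD []).length
decreasing_by
  cases rows with
  | nil => exact absurd (Or.inl (by simp)) h
  | cons r rs =>
    cases r with
    | nil => exact absurd (Or.inr (by simp)) h
    | cons a as => simp

def inverter_alt (MA : List (List Int)) : List (List Int) :=
  let y := (MA.headD []).length
  let temp := MA.reverse.map (fun row => (row.take y).reverse)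
  pyZipStar temp

-- ===== PRECONDITION & SPEC =====
-- A raises IndexError when MA is empty or some row is shorter than the first row, and
-- UnboundLocalError when the first row is empty (MD is never created); exactly those inputs are excluded.
def Pre_inverter (MA : List (List Int)) : Prop :=
  MA ≠ [] ∧ MA.headD [] ≠ [] ∧ ∀ row ∈ MA, (MA.headD []).length ≤ row.length
instance (MA : List (List Int)) : Decidable (Pre_inverter MA) := by unfold Pre_inverter; infer_instance

def pvWitness_inverter : List (List Int) := [[1, 2, 3], [4, 5, 6]]

def Spec_inverter (MA : List (List Int)) (out : List (List Int)) : Prop := out = inverter_alt MA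
instance (MA : List (List Int)) (out : List (List Int)) : Decidable (Spec_inverter MA out) := by unfold Spec_inverter; infer_instance

-- ===== CLAIM (what is proved, stated in full; the proofs are below) =====
def Claim_equal_inverter : Prop := ∀ (MA : List (List Int)), Dom_inverter MA → Pre_inverter MA → Spec_inverter MA (inverter MA)

-- ===== LEMMAS AND PROOFS =====

-- zip(*rows) on a nonempty list of rows that all have length y is the y columns of heads
lemma pyZipStar_uniform (y : Nat) :
    ∀ (rows : List (List Int)), rows ≠ [] → (∀ r ∈ rows, r.length = y) →
      pyZipStar rows = (List.range y).map (fun i => rows.map (fun r => r.getD i 0)) := by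
  induction y with
  | zero =>
    intro rows hne hlen
    rw [pyZipStar]
    have hmem : rows.any List.isEmpty = true := by
      cases rows with
      | nil => exact absurd rfl hne
      | cons r rs =>
        have hr : r = [] := List.length_eq_zero_iff.mp (hlen r (by simp))
        simp [hr]
    simp [hmem]
  | succ y ih =>
    intro rows hne hlen
    rw [pyZipStar]
    have hnotempty : ¬ (rows.isEmpty ∨ rows.any List.isEmpty) := by
      rintro (h | h)
      · exact hne (List.isEmpty_iff.mp h)
      · obtain ⟨r, hr, hre⟩ := List.any_eq_true.mp h
        have := hlen r hr
        rw [List.isEmpty_iff.mp hre] at this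
        simp at this
    rw [dif_neg hnotempty]
    have htails : ∀ r ∈ rows.map List.tail, r.length = y := by
      intro r hr
      obtain ⟨s, hs, rfl⟩ := List.mem_map.mp hr
      have := hlen s hs
      simp [List.length_tail, this]
    have hne' : rows.map List.tail ≠ [] := by
      simpa using hne
    rw [ih _ hne' htails]
    rw [List.range_succ_eq_map]
    simp only [List.map_cons, List.map_map]
    congr 1
    · apply List.map_congr_left
      intro r hr
      have hrne : r ≠ [] := by
        have := hlen r hr; intro h; rw [h] at this; simp at this
      cases r with
      | nil => exact absurd rfl hrne
      | cons a as => simp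
    · apply List.map_congr_left
      intro i _
      simp only [Function.comp]
      apply List.map_congr_left
      intro r hr
      have hrne : r ≠ [] := by
        have := hlen r hr; intro h; rw [h] at this; simp at this
      cases r with
      | nil => exact absurd rfl hrne
      | cons a as => simp

-- ===== VERDICT (by name: the statement is the Claim_ definition above) =====
theorem inverter_spec : Claim_equal_inverter := by
  intro MA _hdom hpre
  obtain ⟨hne, hhd, hlen⟩ := hpre
  unfold Spec_inverter inverter inverter_alt
  simp only [List.headD_eq_head?_getD] at hhd hlen ⊢
  have htemplen : ∀ r ∈ MA.reverse.map (fun row => (row.take (MA.head?.getD []).length).reverse),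
      r.length = (MA.head?.getD []).length := by
    intro r hr
    obtain ⟨row, hrow, rfl⟩ := List.mem_map.mp hr
    have h1 : (MA.head?.getD []).length ≤ row.length := hlen row (List.mem_reverse.mp hrow)
    simp [List.length_take, Nat.min_eq_left h1]
  have htempne : MA.reverse.map (fun row => (row.take (MA.head?.getD []).length).reverse) ≠ [] := by
    simpa using hne
  rw [pyZipStar_uniform (MA.head?.getD []).length _ htempne htemplen]
  apply List.map_congr_left
  intro i hi
  have hiy : i < (MA.head?.getD []).length := List.mem_range.mp hi
  rw [List.map_map]
  apply List.ext_getElem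
  · simp
  · intro j hj₁ hj₂
    simp only [List.length_map, List.length_reverse] at hj₂
    simp only [List.getElem_map, List.getElem_range, List.getElem_reverse,
      Function.comp]
    have hrow : MA.getD (MA.length - 1 - j) [] = MA[MA.length - 1 - j]'(by omega) :=
      List.getD_eq_getElem _ _ (by omega)
    rw [hrow]
    have hrowmem : MA[MA.length - 1 - j]'(by omega) ∈ MA := List.getElem_mem _
    have hry : (MA.head?.getD []).length ≤ (MA[MA.length - 1 - j]'(by omega)).length :=
      hlen _ hrowmem
    have hlt : (MA.head?.getD []).length - 1 - i < (MA[MA.length - 1 - j]'(by omega)).length := by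
      omega
    rw [List.getD_eq_getElem _ _ hlt]
    have hi' : i < ((MA[MA.length - 1 - j]'(by omega)).take
        (MA.head?.getD []).length).reverse.length := by
      rw [List.length_reverse, List.length_take, Nat.min_eq_left hry]; exact hiy
    rw [List.getD_eq_getElem _ _ hi']
    rw [List.getElem_reverse, List.getElem_take]
    congr 1
    rw [List.length_take, Nat.min_eq_left hry]
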